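-- pv_equiv track=rewrite | github.com/JanPK63/agent_lightning | collaboration_result_aggregator.py | _merge_texts
-- ===== SOURCE A (Python) =====
-- from typing import Dict, List, Any, Optional, Set, Tuple, Union
--
-- def _merge_texts(texts: List[str]) -> str:
--     """Merge multiple text results"""
--     # Simple merge - can be enhanced with NLP
--     merged = []
--     seen_sentences = set()
--
--     for text in texts:
--         sentences = text.split('. ')
--         for sentence in sentences:
--             sentence = sentence.strip()
--             if sentence and sentence not in seen_sentences:
--                 merged.append(sentence)
--                 seen_sentences.add(sentence)
--
--     return '. '.join(merged)
-- ===== SOURCE B (Python) =====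
-- def _merge_texts(texts):
--     """Merge multiple text results"""
--     pieces = [p for text in texts for p in map(str.strip, text.split('. ')) if p]
--     merged = []
--     while pieces:
--         # keep the first remaining piece, then drop all of its copies;
--         # first occurrences thus survive in order, with no seen-set at all
--         head = pieces[0]
--         merged.append(head)
--         pieces = [x for x in pieces[1:] if x != head]
--     return '. '.join(merged)
-- ===== Notes on version B (the rewrite author's own statement) =====
-- stated objective: alternative
-- what changed: Replaces A's single interleaved pass with a seen-set accumulator by flattening all stripped non-empty pieces first and then deduplicating with repeated filter-out-the-head passes that keep no auxiliary seen structure at all.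
import Mathlib
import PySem

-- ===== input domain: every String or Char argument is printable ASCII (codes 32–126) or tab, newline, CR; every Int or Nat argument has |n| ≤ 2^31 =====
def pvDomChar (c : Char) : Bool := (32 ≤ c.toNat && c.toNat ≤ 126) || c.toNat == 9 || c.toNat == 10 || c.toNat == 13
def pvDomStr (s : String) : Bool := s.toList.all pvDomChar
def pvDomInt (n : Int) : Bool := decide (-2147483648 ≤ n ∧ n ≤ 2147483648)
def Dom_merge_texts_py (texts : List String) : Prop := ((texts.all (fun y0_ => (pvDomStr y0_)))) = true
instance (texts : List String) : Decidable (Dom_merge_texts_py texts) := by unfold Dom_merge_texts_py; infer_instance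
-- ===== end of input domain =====

-- B drops A's interleaved seen-set loop: it flattens all stripped non-empty pieces first, then
-- deduplicates by repeated filter-out-the-head passes with no auxiliary seen structure (same result, alternative algorithm; not faster).

-- ===== PORT A =====
-- Port of A: one pass over texts, appending unseen nonempty stripped sentences while marking them in a seen-set.
def merge_texts_py (texts : List String) : String :=
  let st := texts.foldl (fun (st : List String × PySem.Set String) text =>
    let sentences := (PySem.Str.split? text ". ").getD []   -- sep is the nonempty literal '. ', so split? is always some
    sentences.foldl (fun st sentence =>
      let sentence := PySem.Str.strip sentence
      if sentence ≠ "" ∧ ¬ PySem.Set.contains st.2 sentence then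
        (st.1 ++ [sentence], PySem.Set.add st.2 sentence)
      else st) st) ([], PySem.Set.empty)
  PySem.Str.join ". " st.1

-- ===== PORT B =====
-- B's while loop: append the first remaining piece to merged, then filter its copies out of the rest.
def pvMergeLoop (merged : List String) (pieces : List String) : List String :=
  match pieces with
  | [] => merged
  | head :: rest => pvMergeLoop (merged ++ [head]) (rest.filter (fun x => x ≠ head))
termination_by pieces.length
decreasing_by
  simp only [List.length_unattach, List.length_cons]
  exact Nat.lt_succ_of_le (le_trans (List.length_filter_le _ _) (by simp))

-- Port of B: flatten the stripped non-empty pieces of every text, then the dedup while-loop.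
def merge_texts_py_alt (texts : List String) : String :=
  let pieces := texts.flatMap (fun text =>
    (((PySem.Str.split? text ". ").getD []).map PySem.Str.strip).filter (fun p => p ≠ ""))
  PySem.Str.join ". " (pvMergeLoop [] pieces)

-- ===== PRECONDITION & SPEC =====
def Spec_merge_texts_py (texts : List String) (out : String) : Prop := out = merge_texts_py_alt texts
instance (texts : List String) (out : String) : Decidable (Spec_merge_texts_py texts out) := by unfold Spec_merge_texts_py; infer_instance

-- ===== CLAIM (what is proved, stated in full; the proofs are below) =====
def Claim_equal_merge_texts_py : Prop := ∀ (texts : List String), Dom_merge_texts_py texts → Spec_merge_texts_py texts (merge_texts_py texts)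

-- ===== LEMMAS AND PROOFS =====

-- A's loop body on an already-stripped piece.
def pvStepA (st : List String × PySem.Set String) (p : String) : List String × PySem.Set String :=
  if p ≠ "" ∧ ¬ PySem.Set.contains st.2 p then (st.1 ++ [p], PySem.Set.add st.2 p) else st

-- The same step once the two components are known equal.
def pvStep (m : PySem.Set String) (p : String) : PySem.Set String :=
  if p ≠ "" then PySem.Set.add m p else m

-- A's paired state stays (m, m): merged equals the seen-set as a list.
lemma pv_pair (l : List String) (m : PySem.Set String) :
    l.foldl pvStepA (m, m) = (l.foldl pvStep m, l.foldl pvStep m) := by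
  induction l generalizing m with
  | nil => rfl
  | cons p t ih =>
    have hstep : pvStepA (m, m) p = (pvStep m p, pvStep m p) := by
      by_cases hp : p = "" <;> by_cases hc : PySem.Set.contains m p <;>
        simp [pvStepA, pvStep, PySem.Set.add, PySem.Set.contains, hp] at hc ⊢ <;>
        simp [hc]
    simp only [List.foldl_cons, hstep, ih]

lemma pv_step_eq (l : List String) :
    l.foldl pvStep [] = PySem.List.dedup (l.filter (fun p => p ≠ "")) := by
  have h2 : l.foldl pvStep [] =
      l.foldl (fun acc x => if x ≠ "" then PySem.Set.add acc x else acc) [] := rfl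
  rw [h2, PySem.List.foldl_ite_eq_foldl_filter (p := fun p : String => p ≠ "")
    (f := PySem.Set.add), PySem.List.dedup_eq_ofList, PySem.Set.ofList_eq_foldl]

-- a fold of folds over pieces of each text is a fold over the flattened pieces
lemma pv_flat {α β γ : Type} (g : α → List β) (f : γ → β → γ) (L : List α) (init : γ) :
    L.foldl (fun st t => (g t).foldl f st) init = (L.flatMap g).foldl f init := by
  induction L generalizing init with
  | nil => rfl
  | cons t ts ih => simp [List.flatMap_cons, List.foldl_append, ih]

-- A's merged list is the ordered dedup of the non-empty stripped pieces.
lemma pv_main (texts : List String) :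
    (texts.foldl (fun (st : List String × PySem.Set String) text =>
        ((PySem.Str.split? text ". ").getD []).foldl (fun st sentence =>
          pvStepA st (PySem.Str.strip sentence)) st) ([], PySem.Set.empty)).1
      = PySem.List.dedup
          ((texts.flatMap (fun text => ((PySem.Str.split? text ". ").getD []).map PySem.Str.strip)).filter
            (fun p => p ≠ "")) := by
  have h1 : ∀ (st : List String × PySem.Set String) (text : String),
      ((PySem.Str.split? text ". ").getD []).foldl (fun st sentence =>
          pvStepA st (PySem.Str.strip sentence)) st
        = (((PySem.Str.split? text ". ").getD []).map PySem.Str.strip).foldl pvStepA st := by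
    intro st text
    rw [List.foldl_map]
  simp only [h1]
  rw [pv_flat]
  have hempty : (([], PySem.Set.empty) : List String × PySem.Set String)
      = (([] : PySem.Set String), ([] : PySem.Set String)) := rfl
  rw [hempty, pv_pair, pv_step_eq]

-- filtering commutes with flattening
lemma pv_filter_flatMap {α β : Type} (p : β → Bool) (g : α → List β) (L : List α) :
    (L.flatMap g).filter p = L.flatMap (fun x => (g x).filter p) := by
  induction L with
  | nil => rfl
  | cons t ts ih => simp [List.flatMap_cons, List.filter_append, ih]

-- once an element is in the accumulator, further copies of it are ignored by Set.add
lemma pv_foldl_add_filter (h : String) (l : List String) (s : PySem.Set String)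
    (hs : PySem.Set.contains s h = true) :
    l.foldl PySem.Set.add s = (l.filter (fun x => x ≠ h)).foldl PySem.Set.add s := by
  induction l generalizing s with
  | nil => rfl
  | cons x t ih =>
    by_cases hx : x = h
    · subst hx
      have hm : x ∈ s := by simpa [PySem.Set.contains] using hs
      have : PySem.Set.add s x = s := by simp [PySem.Set.add, hm]
      simp [List.filter_cons, this, ih s hs]
    · have hs' : PySem.Set.contains (PySem.Set.add s x) h = true := by
        simp [PySem.Set.add, PySem.Set.contains] at hs ⊢
        split <;> simp [hs]
      simp [List.filter_cons, hx, ih _ hs']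

-- an element absent from the rest of the list can be pulled out of the accumulator
lemma pv_foldl_add_pull (h : String) (l : List String) (s : PySem.Set String)
    (hl : h ∉ l) :
    l.foldl PySem.Set.add (h :: s) = h :: l.foldl PySem.Set.add s := by
  induction l generalizing s with
  | nil => rfl
  | cons x t ih =>
    have hx : x ≠ h := by intro e; exact hl (e ▸ List.mem_cons_self ..)
    have ht : h ∉ t := fun m => hl (List.mem_cons_of_mem _ m)
    have hadd : PySem.Set.add (h :: s) x = h :: PySem.Set.add s x := by
      simp [PySem.Set.add, PySem.Set.contains, hx]
      split <;> simp
    simp [hadd, ih _ ht]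

-- PySem's ordered dedup satisfies B's recursion
lemma pv_dedup_cons (h : String) (t : List String) :
    PySem.List.dedup (h :: t) = h :: PySem.List.dedup (t.filter (fun x => x ≠ h)) := by
  have hcont : PySem.Set.contains ([h] : PySem.Set String) h = true := by
    simp [PySem.Set.contains]
  have hnot : h ∉ t.filter (fun x => x ≠ h) := by
    intro m
    have := List.of_mem_filter m
    simp at this
  calc PySem.List.dedup (h :: t)
      = (h :: t).foldl PySem.Set.add [] := by
        rw [PySem.List.dedup_eq_ofList, PySem.Set.ofList_eq_foldl]
    _ = t.foldl PySem.Set.add [h] := by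
        simp [PySem.Set.add, PySem.Set.contains]
    _ = (t.filter (fun x => x ≠ h)).foldl PySem.Set.add [h] :=
        pv_foldl_add_filter h t [h] hcont
    _ = h :: (t.filter (fun x => x ≠ h)).foldl PySem.Set.add [] :=
        pv_foldl_add_pull h _ [] hnot
    _ = h :: PySem.List.dedup (t.filter (fun x => x ≠ h)) := by
        rw [PySem.List.dedup_eq_ofList, PySem.Set.ofList_eq_foldl]

-- proof-only helper: the head-recursion form of the while loop
def pvDedupR (l : List String) : List String :=
  match l with
  | [] => []
  | h :: t => h :: pvDedupR (t.filter (fun x => x ≠ h))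
termination_by l.length
decreasing_by
  simp only [List.length_unattach, List.length_cons]
  exact Nat.lt_succ_of_le (le_trans (List.length_filter_le _ _) (by simp))

-- the accumulator loop computes the head-recursion
lemma pv_loop_eq_aux (n : Nat) : ∀ (l merged : List String), l.length ≤ n →
    pvMergeLoop merged l = merged ++ pvDedupR l := by
  induction n with
  | zero =>
    intro l merged hl
    have : l = [] := List.eq_nil_of_length_eq_zero (Nat.le_zero.mp hl)
    subst this
    rw [pvMergeLoop, pvDedupR]
    simp
  | succ n ih =>
    intro l merged hl
    cases l with
    | nil => rw [pvMergeLoop, pvDedupR]; simp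
    | cons h t =>
      rw [pvMergeLoop, pvDedupR,
        ih _ _ (le_trans (List.length_filter_le _ _) (Nat.le_of_succ_le_succ hl))]
      simp

-- B's recursive dedup computes PySem's ordered dedup (induction on a length bound)
lemma pv_dedupR_eq_aux (n : Nat) : ∀ l : List String, l.length ≤ n → pvDedupR l = PySem.List.dedup l := by
  induction n with
  | zero =>
    intro l hl
    have : l = [] := List.eq_nil_of_length_eq_zero (Nat.le_zero.mp hl)
    subst this
    rw [pvDedupR]
    rfl
  | succ n ih =>
    intro l hl
    cases l with
    | nil => rw [pvDedupR]; rfl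
    | cons h t =>
      rw [pvDedupR, pv_dedup_cons]
      refine congrArg (h :: ·) (ih _ ?_)
      exact le_trans (List.length_filter_le _ _) (Nat.le_of_succ_le_succ hl)

lemma pv_dedupR_eq (l : List String) : pvDedupR l = PySem.List.dedup l :=
  pv_dedupR_eq_aux l.length l le_rfl

-- ===== VERDICT (by name: the statement is the Claim_ definition above) =====
theorem merge_texts_py_spec : Claim_equal_merge_texts_py := by
  intro texts _
  show PySem.Str.join ". " (texts.foldl (fun (st : List String × PySem.Set String) text =>
      ((PySem.Str.split? text ". ").getD []).foldl (fun st sentence =>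
        pvStepA st (PySem.Str.strip sentence)) st) ([], PySem.Set.empty)).1
    = PySem.Str.join ". " (pvMergeLoop [] (texts.flatMap (fun text =>
        (((PySem.Str.split? text ". ").getD []).map PySem.Str.strip).filter (fun p => p ≠ ""))))
  rw [pv_main, pv_loop_eq_aux _ _ [] le_rfl, pv_dedupR_eq, pv_filter_flatMap]
  simp
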